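-- pv_equiv track=rewrite | github.com/tsmorrill/Overpartitions | code/overpartitions.py | overpartitions_bounded
-- ===== SOURCE A (Python) =====
-- def overpartitions_bounded(n, max):
--     list = []
--     for part in range(max + 1)[:0:-1]:
--         for multiplicity in range(n//part + 1)[:0:-1]:
--             if part*multiplicity == n:
--                 new = [part for i in range(multiplicity)]
--                 new_ovr = [-part] + [part for i in range(multiplicity - 1)]
--                 list.append(new)
--                 list.append(new_ovr)
--             for partition in overpartitions_bounded(n - part*multiplicity, part - 1):
--                 new = [part for i in range(multiplicity)]
--                 new += partition
--                 new_ovr = [-part] + [part for i in range(multiplicity - 1)]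
--                 new_ovr += partition
--                 list.append(new)
--                 list.append(new_ovr)
--     return list
-- ===== SOURCE B (Python) =====
-- def overpartitions_bounded(n, max):
--     cache = {}
--
--     def solve(n, m):
--         key = (n, m)
--         if key in cache:
--             return cache[key]
--         out = []
--         for part in range(m, 0, -1):
--             for mult in range(n // part, 0, -1):
--                 rest = solve(n - part * mult, part - 1)
--                 head = [part] * mult
--                 head_ovr = [-part] + [part] * (mult - 1)
--                 if part * mult == n:
--                     out.append(head)
--                     out.append(head_ovr)
--                 for p in rest:
--                     out.append(head + p)
--                     out.append(head_ovr + p)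
--         cache[key] = out
--         return out
--
--     return solve(n, max)
-- ===== Notes on version B (the rewrite author's own statement) =====
-- stated objective: alternative
-- what changed: B memoizes the recursion on the subproblem key (n, m) in a dictionary, so each distinct (remainder, part-bound) subproblem's list of overpartitions is computed once and reused, instead of A's re-running the full recursion for every repeated subcall; list prefixes are built with list repetition instead of comprehensions (intended as faster; measured 4.02x at the largest size both finished, unconfirmed at larger sizes where the output itself is huge so both time out).
import Mathlib
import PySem

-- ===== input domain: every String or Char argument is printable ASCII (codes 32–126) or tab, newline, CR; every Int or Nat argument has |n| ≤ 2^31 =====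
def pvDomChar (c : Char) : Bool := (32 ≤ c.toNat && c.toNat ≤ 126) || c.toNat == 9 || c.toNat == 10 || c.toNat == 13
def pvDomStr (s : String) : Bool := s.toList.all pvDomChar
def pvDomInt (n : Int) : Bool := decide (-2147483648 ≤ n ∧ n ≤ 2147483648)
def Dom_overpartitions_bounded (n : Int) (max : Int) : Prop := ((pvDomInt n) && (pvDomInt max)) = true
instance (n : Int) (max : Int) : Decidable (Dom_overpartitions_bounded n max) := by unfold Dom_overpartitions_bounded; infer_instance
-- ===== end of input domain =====

-- B memoizes the (n, m) subproblems of A's recursion in a dict, computing each subproblem once; A and B return the same list.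

-- ===== PORT A =====
-- Literal port of A; the Int recursion on 'part - 1' is made total with a fuel
-- argument (max.toNat + 1 always suffices: each recursive call lowers the bound).
-- range(k)[:0:-1] is ported as slice? (pyRange 0 k 1) none (some 0) (-1) (step -1 ≠ 0, so .getD [] never fires).
def opbA : Nat → Int → Int → List (List Int)
  | 0, _, _ => []
  | fuel+1, n, max =>
    ((PySem.List.slice? (PySem.List.pyRange 0 (max+1) 1) none (some 0) (-1)).getD []).foldl
      (fun lst part =>
        ((PySem.List.slice? (PySem.List.pyRange 0 (PySem.Int.floordiv n part + 1) 1) none (some 0) (-1)).getD []).foldl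
          (fun lst mult =>
            let lst := if part * mult == n then
                lst ++ [(PySem.List.pyRange 0 mult 1).map (fun _ => part)]
                    ++ [-part :: (PySem.List.pyRange 0 (mult - 1) 1).map (fun _ => part)]
              else lst
            (opbA fuel (n - part * mult) (part - 1)).foldl
              (fun lst partition =>
                lst ++ [((PySem.List.pyRange 0 mult 1).map (fun _ => part)) ++ partition]
                    ++ [(-part :: (PySem.List.pyRange 0 (mult - 1) 1).map (fun _ => part)) ++ partition])
              lst)
          lst)
      []

def overpartitions_bounded (n : Int) (max : Int) : List (List Int) :=
  opbA (max.toNat + 1) n max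

-- ===== PORT B =====
-- Literal port of Source B: recursion with a threaded memo dict keyed by (n, m);
-- the same fuel device (max.toNat + 1 suffices) makes the Int recursion total.
def bSolve : Nat → Int → Int → PySem.Dict (Int × Int) (List (List Int)) →
    List (List Int) × PySem.Dict (Int × Int) (List (List Int))
  | 0, _, _, c => ([], c)
  | fuel+1, n, m, c =>
    match PySem.Dict.get? c (n, m) with
    | some v => (v, c)
    | none =>
      let st := (PySem.List.pyRange m 0 (-1)).foldl
        (fun st part =>
          (PySem.List.pyRange (PySem.Int.floordiv n part) 0 (-1)).foldl
            (fun st mult =>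
              let r := bSolve fuel (n - part * mult) (part - 1) st.2
              let head := PySem.List.pyRepeat [part] mult
              let head_ovr := -part :: PySem.List.pyRepeat [part] (mult - 1)
              let out := if part * mult == n then st.1 ++ [head, head_ovr] else st.1
              (r.1.foldl (fun out p => out ++ [head ++ p, head_ovr ++ p]) out, r.2))
            st)
        ([], c)
      (st.1, PySem.Dict.insert st.2 (n, m) st.1)

def overpartitions_bounded_alt (n : Int) (max : Int) : List (List Int) :=
  (bSolve (max.toNat + 1) n max PySem.Dict.empty).1

-- ===== PRECONDITION & SPEC =====
def Spec_overpartitions_bounded (n : Int) (max : Int) (out : List (List Int)) : Prop := out = overpartitions_bounded_alt n max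
instance (n : Int) (max : Int) (out : List (List Int)) : Decidable (Spec_overpartitions_bounded n max out) := by unfold Spec_overpartitions_bounded; infer_instance

-- ===== CLAIM (what is proved, stated in full; the proofs are below) =====
def Claim_equal_overpartitions_bounded : Prop := ∀ (n : Int) (max : Int), Dom_overpartitions_bounded n max → Spec_overpartitions_bounded n max (overpartitions_bounded n max)

-- ===== LEMMAS AND PROOFS =====

-- range(k)[:0:-1] is the list [k-1, k-2, …, 1]
theorem slice?_rev_drop_one {α : Type} (xs : List α) :
    PySem.List.slice? xs none (some 0) (-1) = some ((xs.drop 1).reverse) := by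
  cases xs with
  | nil => rfl
  | cons x t =>
    simp only [PySem.List.slice?, PySem.List.sliceIndices]
    norm_num
    have hif : (if 0 < t.length then t.length else 0) = t.length := by
      split_ifs with h <;> omega
    rw [hif]
    apply List.ext_getElem (by simp)
    intro i h1 h2
    simp only [List.getElem_map, List.getElem_range, List.getElem_reverse]
    have h1' : i < t.length := by simpa using h1
    have hi : ((t.length : Int) + -(i:Int)).toNat = t.length - i := by omega
    simp only [hi]
    rw [List.getElem_cons]
    split
    · omega
    · congr 1; omega

theorem revRange (m : Int) :
    (PySem.List.slice? (PySem.List.pyRange 0 (m+1) 1) none (some 0) (-1)).getD []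
      = PySem.List.pyRange m 0 (-1) := by
  rw [slice?_rev_drop_one, Option.getD_some]
  by_cases h : 0 < m + 1
  · rw [PySem.List.pyRange_one_cons h, PySem.List.pyRange_neg_one_eq_reverse]
    norm_num
  · rw [PySem.List.pyRange_one_eq_nil (by omega), PySem.List.pyRange_neg_one_eq_nil (by omega)]
    rfl

theorem repl_bridge (k p : Int) :
    (PySem.List.pyRange 0 k 1).map (fun _ => p) = PySem.List.pyRepeat [p] k := by
  simp [PySem.List.pyRange_one, PySem.List.pyRepeat_singleton, List.map_map]
  rw [show ((fun _ => p) ∘ fun (k:Nat) => (k:Int)) = (fun _ => p) from rfl,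
     List.map_const', List.length_range]

theorem opbA_fuel : ∀ (f1 f2 : Nat) (n m : Int), m.toNat < f1 → m.toNat < f2 →
    opbA f1 n m = opbA f2 n m := by
  intro f1
  induction f1 with
  | zero => intro f2 n m h1 h2; omega
  | succ f ihf =>
    intro f2 n m h1 h2
    cases f2 with
    | zero => omega
    | succ g =>
      simp only [opbA]
      rw [revRange]
      apply PySem.List.foldl_congr_mem
      intro acc part hp
      rw [PySem.List.mem_pyRange_neg_one] at hp
      rw [revRange]
      apply PySem.List.foldl_congr_mem
      intro acc2 mult _
      rw [ihf g (n - part * mult) (part - 1) (by omega) (by omega)]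

-- normalized pure loop bodies (used only in proofs)
def headP (part mult : Int) : List Int := PySem.List.pyRepeat [part] mult
def headO (part mult : Int) : List Int := -part :: PySem.List.pyRepeat [part] (mult - 1)

def pureMult (n part : Int) (acc : List (List Int)) (mult : Int) : List (List Int) :=
  let acc' := if part * mult == n then acc ++ [headP part mult, headO part mult] else acc
  (overpartitions_bounded (n - part * mult) (part - 1)).foldl
    (fun o p => o ++ [headP part mult ++ p, headO part mult ++ p]) acc'

def purePart (n : Int) (acc : List (List Int)) (part : Int) : List (List Int) :=
  (PySem.List.pyRange (PySem.Int.floordiv n part) 0 (-1)).foldl (pureMult n part) acc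

theorem opbA_char (n m : Int) :
    overpartitions_bounded n m = (PySem.List.pyRange m 0 (-1)).foldl (purePart n) [] := by
  unfold overpartitions_bounded
  simp only [opbA]
  rw [revRange]
  apply PySem.List.foldl_congr_mem
  intro acc part hp
  rw [PySem.List.mem_pyRange_neg_one] at hp
  unfold purePart
  rw [revRange]
  apply PySem.List.foldl_congr_mem
  intro acc2 mult _
  unfold pureMult headP headO overpartitions_bounded
  rw [repl_bridge mult part, repl_bridge (mult - 1) part,
     opbA_fuel m.toNat ((part - 1).toNat + 1) (n - part * mult) (part - 1) (by omega) (by omega)]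
  simp

def Good (c : PySem.Dict (Int × Int) (List (List Int))) : Prop :=
  ∀ k v, PySem.Dict.get? c k = some v → v = overpartitions_bounded k.1 k.2

theorem bSolve_correct : ∀ (f : Nat) (n m : Int) (c : PySem.Dict (Int × Int) (List (List Int))),
    m.toNat < f → Good c →
    (bSolve f n m c).1 = overpartitions_bounded n m ∧ Good (bSolve f n m c).2 := by
  intro f
  induction f with
  | zero => intro n m c h; omega
  | succ f ihf =>
    intro n m c hm hc
    rcases hg : PySem.Dict.get? c (n, m) with _ | v
    · simp only [bSolve, hg]
      have keyM : ∀ (part : Int), 0 < part → part ≤ m →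
          ∀ (ks : List Int) (acc : List (List Int))
            (c0 : PySem.Dict (Int × Int) (List (List Int))), Good c0 →
          ∃ c1, List.foldl
              (fun st mult =>
                (List.foldl
                    (fun out p =>
                      out ++
                        [PySem.List.pyRepeat [part] mult ++ p, -part :: PySem.List.pyRepeat [part] (mult - 1) ++ p])
                    (if (part * mult == n) = true then
                      st.1 ++ [PySem.List.pyRepeat [part] mult, -part :: PySem.List.pyRepeat [part] (mult - 1)]
                    else st.1)
                    (bSolve f (n - part * mult) (part - 1) st.2).1,
                  (bSolve f (n - part * mult) (part - 1) st.2).2))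
              (acc, c0) ks
            = (List.foldl (pureMult n part) acc ks, c1) ∧ Good c1 := by
        intro part hp1 hp2 ks
        induction ks with
        | nil => intro acc c0 hc0; exact ⟨c0, rfl, hc0⟩
        | cons k t ihk =>
          intro acc c0 hc0
          obtain ⟨h1, h2⟩ := ihf (n - part * k) (part - 1) c0 (by omega) hc0
          simp only [List.foldl_cons]
          have hstep :
              ((List.foldl
                  (fun out p =>
                    out ++
                      [PySem.List.pyRepeat [part] k ++ p, -part :: PySem.List.pyRepeat [part] (k - 1) ++ p])
                  (if (part * k == n) = true then
                    acc ++ [PySem.List.pyRepeat [part] k, -part :: PySem.List.pyRepeat [part] (k - 1)]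
                  else acc)
                  (bSolve f (n - part * k) (part - 1) c0).1,
                (bSolve f (n - part * k) (part - 1) c0).2)
                : List (List Int) × PySem.Dict (Int × Int) (List (List Int)))
              = (pureMult n part acc k, (bSolve f (n - part * k) (part - 1) c0).2) := by
            rw [h1]; rfl
          rw [hstep]
          exact ihk (pureMult n part acc k) _ h2
      have keyP : ∀ (ps : List Int), (∀ p ∈ ps, 0 < p ∧ p ≤ m) →
          ∀ (acc : List (List Int)) (c0 : PySem.Dict (Int × Int) (List (List Int))), Good c0 →
          ∃ c1, List.foldl
              (fun st part =>
                List.foldl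
                  (fun st mult =>
                    (List.foldl
                        (fun out p =>
                          out ++
                            [PySem.List.pyRepeat [part] mult ++ p, -part :: PySem.List.pyRepeat [part] (mult - 1) ++ p])
                        (if (part * mult == n) = true then
                          st.1 ++ [PySem.List.pyRepeat [part] mult, -part :: PySem.List.pyRepeat [part] (mult - 1)]
                        else st.1)
                        (bSolve f (n - part * mult) (part - 1) st.2).1,
                      (bSolve f (n - part * mult) (part - 1) st.2).2))
                  st (PySem.List.pyRange (PySem.Int.floordiv n part) 0 (-1)))
              (acc, c0) ps
            = (List.foldl (purePart n) acc ps, c1) ∧ Good c1 := by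
        intro ps
        induction ps with
        | nil => intro _ acc c0 hc0; exact ⟨c0, rfl, hc0⟩
        | cons p t ihp =>
          intro hb acc c0 hc0
          obtain ⟨hp1, hp2⟩ := hb p (List.mem_cons_self ..)
          simp only [List.foldl_cons]
          obtain ⟨c1, he, hg1⟩ :=
            keyM p hp1 hp2 (PySem.List.pyRange (PySem.Int.floordiv n p) 0 (-1)) acc c0 hc0
          rw [he]
          have : List.foldl (pureMult n p) acc (PySem.List.pyRange (PySem.Int.floordiv n p) 0 (-1))
              = purePart n acc p := rfl
          rw [this]
          exact ihp (fun q hq => hb q (List.mem_cons_of_mem _ hq)) (purePart n acc p) c1 hg1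
      obtain ⟨c1, he, hg1⟩ := keyP (PySem.List.pyRange m 0 (-1))
        (fun p hp => by rw [PySem.List.mem_pyRange_neg_one] at hp; exact ⟨hp.1, hp.2⟩) [] c hc
      rw [he]
      refine ⟨(opbA_char n m).symm, ?_⟩
      intro k v hv
      rw [PySem.Dict.get?_insert] at hv
      split_ifs at hv with hk
      · subst hk
        cases hv
        exact (opbA_char n m).symm
      · exact hg1 k v hv
    · simp only [bSolve, hg]
      exact ⟨hc (n, m) v hg, hc⟩

-- ===== VERDICT (by name: the statement is the Claim_ definition above) =====
theorem overpartitions_bounded_spec : Claim_equal_overpartitions_bounded := by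
  intro n max _
  unfold Spec_overpartitions_bounded overpartitions_bounded_alt
  have h := bSolve_correct (max.toNat + 1) n max PySem.Dict.empty (by omega)
    (by intro k v hv; simp [PySem.Dict.get?_empty] at hv)
  exact h.1.symm
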